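-- pv_equiv track=rewrite | github.com/DJDevon3/Classic_Cryptography | Progressive_Caesar_Matrix/Progressive_Caesar_Matrix.py | progressive_caesar
-- ===== SOURCE A (Python) =====
-- def make_shifts_from_keyword(keyword, alphabet):
--     """Convert keyword into a list of numeric shifts based on the custom alphabet."""
--     shifts = []
--     for c in keyword.upper():
--         if c in alphabet:
--             shifts.append(alphabet.index(c))
--     return shifts if shifts else [0]   # fallback to shift 0 if keyword invalid
--
-- def progressive_caesar(text, alphabet, start_shift, keyword=""):
--     """Progressive Caesar decode. Keyword optional: if empty, only numeric shifting occurs."""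
--     alphabet = alphabet.upper()
--     text = text.upper()
--
--     key_shifts = make_shifts_from_keyword(keyword, alphabet)
--     key_len = len(key_shifts)
--     L = len(alphabet)
--
--     result = ""
--     progressive_shift = start_shift
--     i = 0
--
--     for char in text:
--         if char in alphabet:
--             idx = alphabet.index(char)
--             total_shift = progressive_shift + key_shifts[i % key_len]
--             decoded = alphabet[(idx - total_shift) % L]
--             result += decoded
--
--             progressive_shift += 1
--             i += 1
--         else:
--             result += char
--
--     return result
-- ===== SOURCE B (Python) =====
-- def progressive_caesar(text, alphabet, start_shift, keyword=""):
--     """Progressive Caesar decode: closed-form shifts, filter/map then merge."""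
--     alphabet = alphabet.upper()
--     text = text.upper()
--     key_shifts = [alphabet.index(c) for c in keyword.upper() if c in alphabet] or [0]
--     key_len = len(key_shifts)
--     L = len(alphabet)
--     decoded = [alphabet[(alphabet.index(ch) - (start_shift + n + key_shifts[n % key_len])) % L]
--                for n, ch in enumerate(c for c in text if c in alphabet)]
--     it = iter(decoded)
--     return ''.join(next(it) if c in alphabet else c for c in text)
-- ===== Notes on version B (the rewrite author's own statement) =====
-- stated objective: alternative
-- what changed: Replaces A's single stateful loop (growing string, running progressive_shift and letter counter) by a closed-form shift start_shift+n+key_shifts[n%key_len]: a filter/comprehension builds the list of decoded letters in one pass, and a second pass merges them back with the non-alphabet characters via an iterator; the keyword-shift helper becomes a comprehension too.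
import Mathlib
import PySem

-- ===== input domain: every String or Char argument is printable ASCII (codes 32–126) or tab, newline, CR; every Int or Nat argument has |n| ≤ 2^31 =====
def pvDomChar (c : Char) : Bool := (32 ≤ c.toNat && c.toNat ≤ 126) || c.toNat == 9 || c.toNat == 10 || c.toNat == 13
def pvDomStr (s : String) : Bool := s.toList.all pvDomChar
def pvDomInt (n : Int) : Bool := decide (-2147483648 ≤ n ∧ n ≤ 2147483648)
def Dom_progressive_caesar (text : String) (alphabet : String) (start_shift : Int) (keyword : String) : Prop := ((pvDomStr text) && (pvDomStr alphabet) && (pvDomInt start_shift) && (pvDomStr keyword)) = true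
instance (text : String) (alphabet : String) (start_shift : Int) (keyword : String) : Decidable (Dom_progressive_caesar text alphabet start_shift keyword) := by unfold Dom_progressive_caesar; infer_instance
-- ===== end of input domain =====

-- B replaces A's stateful decode loop by a closed-form shift with a filter/map pass
-- plus a merge pass (alternative decomposition, same cost).

-- ===== PORT A =====
-- `c in alphabet` for a 1-char c is exactly char membership (List.contains);
-- `alphabet.index(c)` is guarded by that membership, so `(index? …).getD 0` and the
-- `(pyGet? …).getD c` below never take their (unreachable) defaults.
def make_shifts_from_keyword (keyword : List Char) (alphabet : List Char) : List Int :=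
  let shifts := (PySem.Chars.upper keyword).foldl
    (fun shifts c => if alphabet.contains c then
        shifts ++ [((PySem.List.index? alphabet c).getD 0 : Int)] else shifts) []
  if shifts = [] then [0] else shifts

def pvStepA (alph : List Char) (ks : List Int) (k L : Nat)
    (st : List Char × Int × Nat) (c : Char) : List Char × Int × Nat :=
  if alph.contains c then
    let idx : Int := ((PySem.List.index? alph c).getD 0 : Int)
    let total := st.2.1 + ks.getD (st.2.2 % k) 0
    let dec := (PySem.List.pyGet? alph (PySem.Int.mod (idx - total) (L : Int))).getD c
    (st.1 ++ [dec], st.2.1 + 1, st.2.2 + 1)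
  else (st.1 ++ [c], st.2.1, st.2.2)

def progressive_caesar (text : String) (alphabet : String) (start_shift : Int) (keyword : String) : String :=
  let alph := PySem.Chars.upper alphabet.toList
  let t := PySem.Chars.upper text.toList
  let ks := make_shifts_from_keyword keyword.toList alph
  let k := ks.length
  let L := alph.length
  String.ofList (t.foldl (pvStepA alph ks k L) ([], start_shift, 0)).1

-- ===== PORT B =====
def pvDecB (alph : List Char) (ks : List Int) (start : Int) (p : Int × Char) : Char :=
  (PySem.List.pyGet? alph (PySem.Int.mod (((PySem.List.index? alph p.2).getD 0 : Int)
      - (start + p.1 + ks.getD (p.1.toNat % ks.length) 0)) (alph.length : Int))).getD p.2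

-- the [] inner branch is unreachable: decoded holds one letter per alphabet char of t
def pvMergeB (alph : List Char) : List Char → List Char → List Char
  | [], _ => []
  | c :: rest, ds =>
    if alph.contains c then
      match ds with
      | d :: ds' => d :: pvMergeB alph rest ds'
      | [] => []
    else c :: pvMergeB alph rest ds

def progressive_caesar_alt (text : String) (alphabet : String) (start_shift : Int) (keyword : String) : String :=
  let alph := PySem.Chars.upper alphabet.toList
  let t := PySem.Chars.upper text.toList
  let ks0 := ((PySem.Chars.upper keyword.toList).filter (fun c => alph.contains c)).map
      (fun c => ((PySem.List.index? alph c).getD 0 : Int))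
  let ks := if ks0 = [] then [0] else ks0
  let decoded := (PySem.List.enumerate (t.filter (fun c => alph.contains c))).map
      (pvDecB alph ks start_shift)
  String.ofList (pvMergeB alph t decoded)

-- ===== PRECONDITION & SPEC =====
def Spec_progressive_caesar (text : String) (alphabet : String) (start_shift : Int) (keyword : String) (out : String) : Prop := out = progressive_caesar_alt text alphabet start_shift keyword
instance (text : String) (alphabet : String) (start_shift : Int) (keyword : String) (out : String) : Decidable (Spec_progressive_caesar text alphabet start_shift keyword out) := by unfold Spec_progressive_caesar; infer_instance

-- ===== CLAIM (what is proved, stated in full; the proofs are below) =====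
def Claim_equal_progressive_caesar : Prop := ∀ (text : String) (alphabet : String) (start_shift : Int) (keyword : String), Dom_progressive_caesar text alphabet start_shift keyword → Spec_progressive_caesar text alphabet start_shift keyword (progressive_caesar text alphabet start_shift keyword)

-- ===== LEMMAS AND PROOFS =====

-- the common specification: one structural recursion carrying only the letter counter n
def pvG (alph : List Char) (ks : List Int) (start : Int) : List Char → Nat → List Char
  | [], _ => []
  | c :: rest, n =>
    if alph.contains c then
      (PySem.List.pyGet? alph (PySem.Int.mod (((PySem.List.index? alph c).getD 0 : Int)
          - (start + (n : Int) + ks.getD (n % ks.length) 0)) (alph.length : Int))).getD c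
        :: pvG alph ks start rest (n + 1)
    else c :: pvG alph ks start rest n

lemma pvA_loop (alph : List Char) (ks : List Int) (start : Int) :
    ∀ (chars : List Char) (res : List Char) (n : Nat),
      (chars.foldl (pvStepA alph ks ks.length alph.length) (res, start + (n : Int), n)).1
        = res ++ pvG alph ks start chars n := by
  intro chars
  induction chars with
  | nil => intro res n; simp [pvG]
  | cons c rest ih =>
    intro res n
    by_cases h : alph.contains c
    · have hc : start + (n : Int) + 1 = start + ((n + 1 : Nat) : Int) := by push_cast; ring
      simp only [List.foldl_cons, pvStepA, h, if_pos, pvG, hc]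
      rw [ih]
      simp [add_assoc]
    · simp only [List.foldl_cons, pvStepA, pvG, h, Bool.false_eq_true, if_false]
      rw [ih]
      simp

lemma pvA_loop0 (alph : List Char) (ks : List Int) (start : Int) (t : List Char) :
    (t.foldl (pvStepA alph ks ks.length alph.length) ([], start, 0)).1
      = pvG alph ks start t 0 := by
  simpa using pvA_loop alph ks start t [] 0

lemma pvB_merge (alph : List Char) (ks : List Int) (start : Int) :
    ∀ (chars : List Char) (n : Nat),
      pvMergeB alph chars
        ((PySem.List.enumerate (chars.filter (fun c => alph.contains c)) (n : Int)).map
          (pvDecB alph ks start))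
        = pvG alph ks start chars n := by
  intro chars
  induction chars with
  | nil => intro n; simp [pvMergeB, pvG]
  | cons c rest ih =>
    intro n
    by_cases hc : c ∈ alph
    · have ih' := ih (n + 1)
      push_cast at ih'
      simp [pvMergeB, pvG, pvDecB, hc]
      simpa [List.contains_eq_mem] using ih'
    · simp [pvMergeB, pvG, hc]
      simpa [List.contains_eq_mem] using ih n

lemma pvB_merge0 (alph : List Char) (ks : List Int) (start : Int) (t : List Char) :
    pvMergeB alph t
        ((PySem.List.enumerate (t.filter (fun c => alph.contains c))).map
          (pvDecB alph ks start))
      = pvG alph ks start t 0 := by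
  simpa using pvB_merge alph ks start t 0

lemma pv_ks_eq (keyword alph : List Char) :
    make_shifts_from_keyword keyword alph
      = (if ((PySem.Chars.upper keyword).filter (fun c => alph.contains c)).map
            (fun c => ((PySem.List.index? alph c).getD 0 : Int)) = [] then [0]
         else ((PySem.Chars.upper keyword).filter (fun c => alph.contains c)).map
            (fun c => ((PySem.List.index? alph c).getD 0 : Int))) := by
  unfold make_shifts_from_keyword
  rw [PySem.List.foldl_append_if]
  simp only [List.nil_append]

-- ===== VERDICT (by name: the statement is the Claim_ definition above) =====
theorem progressive_caesar_spec : Claim_equal_progressive_caesar := by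
  intro text alphabet start_shift keyword _
  unfold Spec_progressive_caesar progressive_caesar progressive_caesar_alt
  dsimp only
  rw [pv_ks_eq, pvA_loop0, pvB_merge0]
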